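-- pv_equiv track=rewrite | github.com/Dirk4017/ArbitrageFinder | resolvers/idempotent_resolver.py | _format_market_type_for_r
-- ===== SOURCE A (Python) =====
-- def _format_market_type_for_r(market_type: str, sport: str, stat_type: str = None) -> str:
--     """Format market type to what R script expects"""
--     if not market_type:
--         return market_type
--
--     market_lower = market_type.lower()
--     sport_lower = sport.lower() if sport else ''
--
--     # NBA formats
--     if sport_lower in ['nba', 'basketball', 'wnba', 'ncaab', 'ncaaw']:
--         if stat_type == 'points' or 'points' in market_lower:
--             return "Player Points"
--         elif stat_type == 'rebounds' or 'rebounds' in market_lower: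
--             return "Player Rebounds"
--         elif stat_type == 'assists' or 'assists' in market_lower:
--             return "Player Assists"
--         elif stat_type == 'three_pointers_made' or any(x in market_lower for x in ['threes', '3pt', 'three point']):
--             return "threes"
--         elif 'points + assists' in market_lower or 'points+assists' in market_lower:
--             return "Points + Assists"
--         elif 'points + rebounds' in market_lower or 'points+rebounds' in market_lower:
--             return "Points + Rebounds"
--         elif 'rebounds + assists' in market_lower or 'rebounds+assists' in market_lower:
--             return "Rebounds + Assists"
--         elif any(x in market_lower for x in ['pra', 'points+rebounds+assists', 'points + rebounds + assists']):
--             return "Points + Rebounds + Assists"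
--
--     # NFL formats
--     elif sport_lower in ['nfl', 'football']:
--         if stat_type == 'passing_yards' or 'passing yards' in market_lower:
--             return "Player Passing Yards"
--         elif stat_type == 'receiving_yards' or 'receiving yards' in market_lower:
--             return "Player Receiving Yards"
--         elif stat_type == 'rushing_yards' or 'rushing yards' in market_lower:
--             return "Player Rushing Yards"
--         elif stat_type == 'receptions' or 'receptions' in market_lower:
--             return "Player Receptions"
--         elif stat_type == 'touchdowns' or 'touchdown' in market_lower:
--             return "Player Touchdowns"
--
--     # MLB formats
--     elif sport_lower in ['mlb', 'baseball']:
--         if stat_type == 'hits' or 'hits' in market_lower: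
--             return "Player Hits"
--         elif stat_type == 'home_runs' or 'home runs' in market_lower:
--             return "Player Home Runs"
--         elif stat_type == 'rbi' or 'rbi' in market_lower:
--             return "Player RBI"
--
--     # NHL formats
--     elif sport_lower in ['nhl', 'hockey']:
--         if stat_type == 'goals' or 'goals' in market_lower:
--             return "Player Goals"
--         elif stat_type == 'assists' or 'assists' in market_lower:
--             return "Player Assists"
--         elif stat_type == 'shots' or any(x in market_lower for x in ['shots', 'sog']):
--             return "Player Shots On Goal"
--         elif stat_type == 'saves' or 'saves' in market_lower:
--             return "Player Saves"
--
--     # If no formatting applied, return original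
--     return market_type
-- ===== SOURCE B (Python) =====
-- # Table-driven rewrite: one ordered rule table per sport alias, first matching rule wins.
-- _RULES = {}
--
-- def _add(aliases, rules):
--     for a in aliases:
--         _RULES[a] = rules
--
-- _add(['nba', 'basketball', 'wnba', 'ncaab', 'ncaaw'], [
--     ('points', ['points'], "Player Points"),
--     ('rebounds', ['rebounds'], "Player Rebounds"),
--     ('assists', ['assists'], "Player Assists"),
--     ('three_pointers_made', ['threes', '3pt', 'three point'], "threes"),
--     (None, ['points + assists', 'points+assists'], "Points + Assists"),
--     (None, ['points + rebounds', 'points+rebounds'], "Points + Rebounds"),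
--     (None, ['rebounds + assists', 'rebounds+assists'], "Rebounds + Assists"),
--     (None, ['pra', 'points+rebounds+assists', 'points + rebounds + assists'], "Points + Rebounds + Assists"),
-- ])
-- _add(['nfl', 'football'], [
--     ('passing_yards', ['passing yards'], "Player Passing Yards"),
--     ('receiving_yards', ['receiving yards'], "Player Receiving Yards"),
--     ('rushing_yards', ['rushing yards'], "Player Rushing Yards"),
--     ('receptions', ['receptions'], "Player Receptions"),
--     ('touchdowns', ['touchdown'], "Player Touchdowns"),
-- ])
-- _add(['mlb', 'baseball'], [
--     ('hits', ['hits'], "Player Hits"),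
--     ('home_runs', ['home runs'], "Player Home Runs"),
--     ('rbi', ['rbi'], "Player RBI"),
-- ])
-- _add(['nhl', 'hockey'], [
--     ('goals', ['goals'], "Player Goals"),
--     ('assists', ['assists'], "Player Assists"),
--     ('shots', ['shots', 'sog'], "Player Shots On Goal"),
--     ('saves', ['saves'], "Player Saves"),
-- ])
--
-- def _format_market_type_for_r(market_type: str, sport: str, stat_type: str = None) -> str:
--     """Format market type to what R script expects"""
--     if not market_type:
--         return market_type
--     market_lower = market_type.lower()
--     sport_lower = sport.lower() if sport else ''
--     for st, keywords, label in _RULES.get(sport_lower, ()):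
--         if (st is not None and stat_type == st) or any(k in market_lower for k in keywords):
--             return label
--     return market_type
-- ===== Notes on version B (the rewrite author's own statement) =====
-- stated objective: simpler
-- what changed: Replaced the four hand-written per-sport if/elif cascades with a data table (dict mapping each sport alias to an ordered rule list of (stat_type, keywords, label)) scanned by one generic first-match loop, preserving the original rule order.
import Mathlib
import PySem

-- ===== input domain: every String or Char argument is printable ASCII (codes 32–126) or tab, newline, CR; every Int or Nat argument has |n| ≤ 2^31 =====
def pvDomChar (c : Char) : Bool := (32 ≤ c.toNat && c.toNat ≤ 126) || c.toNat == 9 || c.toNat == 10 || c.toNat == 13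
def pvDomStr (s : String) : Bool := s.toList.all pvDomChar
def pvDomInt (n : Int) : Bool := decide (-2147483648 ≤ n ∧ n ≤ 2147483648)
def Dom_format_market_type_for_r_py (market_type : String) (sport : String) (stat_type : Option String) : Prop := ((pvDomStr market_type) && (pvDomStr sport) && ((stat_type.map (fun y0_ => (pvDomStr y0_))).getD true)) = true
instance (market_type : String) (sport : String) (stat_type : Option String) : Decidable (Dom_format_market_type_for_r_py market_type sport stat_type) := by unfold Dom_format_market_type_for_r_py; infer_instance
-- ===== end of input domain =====

-- B rewrites A's hand-written if/elif cascade as a data table (dict alias → ordered rule list,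
-- first matching rule wins); objective: simpler. Same results everywhere.

-- ===== PORT A =====
-- literal transliteration of the Python if/elif cascade
def format_market_type_for_r_py (market_type : String) (sport : String) (stat_type : Option String) : String :=
  if market_type = "" then market_type
  else
    let market_lower := PySem.Str.lower market_type
    let sport_lower := if sport ≠ "" then PySem.Str.lower sport else ""
    if sport_lower ∈ ["nba", "basketball", "wnba", "ncaab", "ncaaw"] then
      if stat_type = some "points" ∨ PySem.Str.isIn "points" market_lower then "Player Points"
      else if stat_type = some "rebounds" ∨ PySem.Str.isIn "rebounds" market_lower then "Player Rebounds"
      else if stat_type = some "assists" ∨ PySem.Str.isIn "assists" market_lower then "Player Assists"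
      else if stat_type = some "three_pointers_made" ∨ (["threes", "3pt", "three point"].any (fun x => PySem.Str.isIn x market_lower)) then "threes"
      else if PySem.Str.isIn "points + assists" market_lower ∨ PySem.Str.isIn "points+assists" market_lower then "Points + Assists"
      else if PySem.Str.isIn "points + rebounds" market_lower ∨ PySem.Str.isIn "points+rebounds" market_lower then "Points + Rebounds"
      else if PySem.Str.isIn "rebounds + assists" market_lower ∨ PySem.Str.isIn "rebounds+assists" market_lower then "Rebounds + Assists"
      else if ["pra", "points+rebounds+assists", "points + rebounds + assists"].any (fun x => PySem.Str.isIn x market_lower) then "Points + Rebounds + Assists"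
      else market_type
    else if sport_lower ∈ ["nfl", "football"] then
      if stat_type = some "passing_yards" ∨ PySem.Str.isIn "passing yards" market_lower then "Player Passing Yards"
      else if stat_type = some "receiving_yards" ∨ PySem.Str.isIn "receiving yards" market_lower then "Player Receiving Yards"
      else if stat_type = some "rushing_yards" ∨ PySem.Str.isIn "rushing yards" market_lower then "Player Rushing Yards"
      else if stat_type = some "receptions" ∨ PySem.Str.isIn "receptions" market_lower then "Player Receptions"
      else if stat_type = some "touchdowns" ∨ PySem.Str.isIn "touchdown" market_lower then "Player Touchdowns"
      else market_type
    else if sport_lower ∈ ["mlb", "baseball"] then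
      if stat_type = some "hits" ∨ PySem.Str.isIn "hits" market_lower then "Player Hits"
      else if stat_type = some "home_runs" ∨ PySem.Str.isIn "home runs" market_lower then "Player Home Runs"
      else if stat_type = some "rbi" ∨ PySem.Str.isIn "rbi" market_lower then "Player RBI"
      else market_type
    else if sport_lower ∈ ["nhl", "hockey"] then
      if stat_type = some "goals" ∨ PySem.Str.isIn "goals" market_lower then "Player Goals"
      else if stat_type = some "assists" ∨ PySem.Str.isIn "assists" market_lower then "Player Assists"
      else if stat_type = some "shots" ∨ (["shots", "sog"].any (fun x => PySem.Str.isIn x market_lower)) then "Player Shots On Goal"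
      else if stat_type = some "saves" ∨ PySem.Str.isIn "saves" market_lower then "Player Saves"
      else market_type
    else market_type

-- ===== PORT B =====
-- a rule is (optional stat_type to equal, keywords to look for in market_lower, label)
def pvNbaRules : List (Option String × List String × String) :=
  [ (some "points", ["points"], "Player Points"),
    (some "rebounds", ["rebounds"], "Player Rebounds"),
    (some "assists", ["assists"], "Player Assists"),
    (some "three_pointers_made", ["threes", "3pt", "three point"], "threes"),
    (none, ["points + assists", "points+assists"], "Points + Assists"),
    (none, ["points + rebounds", "points+rebounds"], "Points + Rebounds"),
    (none, ["rebounds + assists", "rebounds+assists"], "Rebounds + Assists"),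
    (none, ["pra", "points+rebounds+assists", "points + rebounds + assists"], "Points + Rebounds + Assists") ]

def pvNflRules : List (Option String × List String × String) :=
  [ (some "passing_yards", ["passing yards"], "Player Passing Yards"),
    (some "receiving_yards", ["receiving yards"], "Player Receiving Yards"),
    (some "rushing_yards", ["rushing yards"], "Player Rushing Yards"),
    (some "receptions", ["receptions"], "Player Receptions"),
    (some "touchdowns", ["touchdown"], "Player Touchdowns") ]

def pvMlbRules : List (Option String × List String × String) :=
  [ (some "hits", ["hits"], "Player Hits"),
    (some "home_runs", ["home runs"], "Player Home Runs"),
    (some "rbi", ["rbi"], "Player RBI") ]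

def pvNhlRules : List (Option String × List String × String) :=
  [ (some "goals", ["goals"], "Player Goals"),
    (some "assists", ["assists"], "Player Assists"),
    (some "shots", ["shots", "sog"], "Player Shots On Goal"),
    (some "saves", ["saves"], "Player Saves") ]

-- the _RULES dict of Source B: one entry per sport alias
def pvRulesDict : PySem.Dict String (List (Option String × List String × String)) :=
  PySem.Dict.ofList
    ([("nba", pvNbaRules), ("basketball", pvNbaRules), ("wnba", pvNbaRules),
      ("ncaab", pvNbaRules), ("ncaaw", pvNbaRules),
      ("nfl", pvNflRules), ("football", pvNflRules),
      ("mlb", pvMlbRules), ("baseball", pvMlbRules),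
      ("nhl", pvNhlRules), ("hockey", pvNhlRules)])

-- Source B's for-loop over the rule list: first matching rule's label, else the original market_type
def pvApplyRules (stat_type : Option String) (market_lower : String) (market_type : String) :
    List (Option String × List String × String) → String
  | [] => market_type
  | (st, keywords, label) :: rest =>
      if (match st with | some s => stat_type == some s | none => false) ||
         keywords.any (fun k => PySem.Str.isIn k market_lower) then label
      else pvApplyRules stat_type market_lower market_type rest

def format_market_type_for_r_py_alt (market_type : String) (sport : String) (stat_type : Option String) : String :=
  if market_type = "" then market_type
  else
    let market_lower := PySem.Str.lower market_type
    let sport_lower := if sport ≠ "" then PySem.Str.lower sport else ""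
    pvApplyRules stat_type market_lower market_type (pvRulesDict.getD sport_lower [])

-- ===== PRECONDITION & SPEC =====
def Spec_format_market_type_for_r_py (market_type : String) (sport : String) (stat_type : Option String) (out : String) : Prop := out = format_market_type_for_r_py_alt market_type sport stat_type
instance (market_type : String) (sport : String) (stat_type : Option String) (out : String) : Decidable (Spec_format_market_type_for_r_py market_type sport stat_type out) := by unfold Spec_format_market_type_for_r_py; infer_instance

-- ===== CLAIM (what is proved, stated in full; the proofs are below) =====
def Claim_equal_format_market_type_for_r_py : Prop := ∀ (market_type : String) (sport : String) (stat_type : Option String), Dom_format_market_type_for_r_py market_type sport stat_type → Spec_format_market_type_for_r_py market_type sport stat_type (format_market_type_for_r_py market_type sport stat_type)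

-- ===== LEMMAS AND PROOFS =====

theorem pvRulesDict_items : pvRulesDict.items =
    [("nba", pvNbaRules), ("basketball", pvNbaRules), ("wnba", pvNbaRules),
     ("ncaab", pvNbaRules), ("ncaaw", pvNbaRules),
     ("nfl", pvNflRules), ("football", pvNflRules),
     ("mlb", pvMlbRules), ("baseball", pvMlbRules),
     ("nhl", pvNhlRules), ("hockey", pvNhlRules)] := by rfl

-- dispatch: the table lookup agrees with A's membership tests, for every key
set_option maxHeartbeats 1000000 in
theorem pvRulesDict_getD (sl : String) :
    pvRulesDict.getD sl [] =
      if sl ∈ ["nba", "basketball", "wnba", "ncaab", "ncaaw"] then pvNbaRules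
      else if sl ∈ ["nfl", "football"] then pvNflRules
      else if sl ∈ ["mlb", "baseball"] then pvMlbRules
      else if sl ∈ ["nhl", "hockey"] then pvNhlRules
      else [] := by
  simp only [PySem.Dict.getD, PySem.Dict.get?, pvRulesDict_items]
  by_cases h1 : sl = "nba"
  · subst h1; rfl
  rw [List.find?_cons_of_neg (by simp [Ne.symm h1])]
  by_cases h2 : sl = "basketball"
  · subst h2; rfl
  rw [List.find?_cons_of_neg (by simp [Ne.symm h2])]
  by_cases h3 : sl = "wnba"
  · subst h3; rfl
  rw [List.find?_cons_of_neg (by simp [Ne.symm h3])]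
  by_cases h4 : sl = "ncaab"
  · subst h4; rfl
  rw [List.find?_cons_of_neg (by simp [Ne.symm h4])]
  by_cases h5 : sl = "ncaaw"
  · subst h5; rfl
  rw [List.find?_cons_of_neg (by simp [Ne.symm h5])]
  by_cases h6 : sl = "nfl"
  · subst h6; rfl
  rw [List.find?_cons_of_neg (by simp [Ne.symm h6])]
  by_cases h7 : sl = "football"
  · subst h7; rfl
  rw [List.find?_cons_of_neg (by simp [Ne.symm h7])]
  by_cases h8 : sl = "mlb"
  · subst h8; rfl
  rw [List.find?_cons_of_neg (by simp [Ne.symm h8])]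
  by_cases h9 : sl = "baseball"
  · subst h9; rfl
  rw [List.find?_cons_of_neg (by simp [Ne.symm h9])]
  by_cases h10 : sl = "nhl"
  · subst h10; rfl
  rw [List.find?_cons_of_neg (by simp [Ne.symm h10])]
  by_cases h11 : sl = "hockey"
  · subst h11; rfl
  rw [List.find?_cons_of_neg (by simp [Ne.symm h11])]
  simp [h1, h2, h3, h4, h5, h6, h7, h8, h9, h10, h11]

-- ===== VERDICT (by name: the statement is the Claim_ definition above) =====
set_option maxHeartbeats 1000000 in
theorem format_market_type_for_r_py_spec : Claim_equal_format_market_type_for_r_py := by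
  intro market_type sport stat_type _
  unfold Spec_format_market_type_for_r_py format_market_type_for_r_py format_market_type_for_r_py_alt
  by_cases hm : market_type = ""
  · simp [hm]
  · simp only [hm, if_false, pvRulesDict_getD]
    split_ifs <;>
      simp_all [pvApplyRules, pvNbaRules, pvNflRules, pvMlbRules, pvNhlRules]
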